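-- pv_equiv track=rewrite | github.com/gshanbhag525/Joy-Of-Computing-With-Python-NPTEL | week 9/prog_assign_3.py | rMat
-- ===== SOURCE A (Python) =====
-- def rMat(mat):
--   if not len(mat):
--     return
--
--   """
--   	 top:starting row index
--      bottom:ending row index
--      left:starting column index
--      right:ending column index
--   """
--   top=0
--   bottom=len(mat)-1
--   left=0
--   right=len(mat[0])-1
--   while left<right and top<bottom:
--     prev=mat[top+1][left]
--     for i in range(left, right+1):
--       cr=mat[top][i]
--       mat[top][i]=prev
--       prev=cr
--     top+=1
--     for i in range(top, bottom+1):
--       cr=mat[i][right]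
--       mat[i][right]=prev
--       prev=cr
--     right-=1
--     for i in range(right, left-1, -1):
--       cr=mat[bottom][i]
--       mat[bottom][i]=prev
--       prev=cr
--     bottom-=1
--     for i in range(bottom, top-1, -1):
--       cr=mat[i][left]
--       mat[i][left]=prev
--       prev=cr
--     left+=1
--   return mat
-- ===== SOURCE B (Python) =====
-- def rMat(mat):
--     if not mat:
--         return None
--     top, bottom, left, right = 0, len(mat) - 1, 0, len(mat[0]) - 1
--     while left < right and top < bottom:
--         pos = ([(top, i) for i in range(left, right + 1)]
--                + [(i, right) for i in range(top + 1, bottom + 1)]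
--                + [(bottom, i) for i in range(right - 1, left - 1, -1)]
--                + [(i, left) for i in range(bottom - 1, top, -1)])
--         vals = [mat[r][c] for r, c in pos]
--         rot = [vals[-1]] + vals[:-1]
--         for (r, c), v in zip(pos, rot):
--             mat[r][c] = v
--         top += 1
--         bottom -= 1
--         left += 1
--         right -= 1
--     return mat
-- ===== Notes on version B (the rewrite author's own statement) =====
-- stated objective: alternative
-- what changed: Each layer is rotated by gathering its clockwise perimeter values into a list, rotating that list by one, and writing it back, instead of A's four index loops threading a carried 'prev' value around the perimeter.
import Mathlib
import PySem

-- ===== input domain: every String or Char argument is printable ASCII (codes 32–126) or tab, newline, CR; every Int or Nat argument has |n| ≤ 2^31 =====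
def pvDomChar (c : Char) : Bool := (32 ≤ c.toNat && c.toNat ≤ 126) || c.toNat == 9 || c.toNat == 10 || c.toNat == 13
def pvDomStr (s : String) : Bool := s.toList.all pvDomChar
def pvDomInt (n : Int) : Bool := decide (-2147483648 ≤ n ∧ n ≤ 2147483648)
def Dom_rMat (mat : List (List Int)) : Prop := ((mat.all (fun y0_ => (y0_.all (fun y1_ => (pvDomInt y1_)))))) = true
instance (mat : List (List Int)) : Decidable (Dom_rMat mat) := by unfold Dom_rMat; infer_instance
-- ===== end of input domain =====

-- B rotates each rectangular layer by gathering its perimeter values, rotating the list by one,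
-- and writing it back — instead of A's four carry-threading in-place loops (objective: alternative,
-- same cost). Both Pythons mutate `mat` in place the same way; the theorems are about the return value.

-- mat[r][c] (read) and mat[r][c] = v (write); exact for indices Python accepts (Pre_ keeps them in range)
def pvGet (m : List (List Int)) (r c : Int) : Int :=
  PySem.List.pyGetD (PySem.List.pyGetD m r []) c 0

def pvSet (m : List (List Int)) (r c : Int) (v : Int) : List (List Int) :=
  PySem.List.pySetD m r (PySem.List.pySetD (PySem.List.pyGetD m r []) c v)

-- ===== PORT A =====
-- fuel is a totality device only: rMat passes enough for the while loop to run to completion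
def rMatLoop (fuel : Nat) (m : List (List Int)) (top bottom left right : Int) : List (List Int) :=
  match fuel with
  | 0 => m
  | fuel + 1 =>
  if left < right ∧ top < bottom then
    let prev0 := pvGet m (top + 1) left
    let s1 := (PySem.List.pyRange left (right + 1) 1).foldl
      (fun (s : List (List Int) × Int) i => (pvSet s.1 top i s.2, pvGet s.1 top i)) (m, prev0)
    let top' := top + 1
    let s2 := (PySem.List.pyRange top' (bottom + 1) 1).foldl
      (fun (s : List (List Int) × Int) i => (pvSet s.1 i right s.2, pvGet s.1 i right)) s1
    let right' := right - 1
    let s3 := (PySem.List.pyRange right' (left - 1) (-1)).foldl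
      (fun (s : List (List Int) × Int) i => (pvSet s.1 bottom i s.2, pvGet s.1 bottom i)) s2
    let bottom' := bottom - 1
    let s4 := (PySem.List.pyRange bottom' (top' - 1) (-1)).foldl
      (fun (s : List (List Int) × Int) i => (pvSet s.1 i left s.2, pvGet s.1 i left)) s3
    rMatLoop fuel s4.1 top' bottom' (left + 1) right'
  else m

def rMat (mat : List (List Int)) : Option (List (List Int)) :=
  if PySem.List.len mat = 0 then none
  else some (rMatLoop (PySem.List.len (PySem.List.pyGetD mat 0 []) - 1).toNat
    mat 0 (PySem.List.len mat - 1) 0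
    (PySem.List.len (PySem.List.pyGetD mat 0 []) - 1))

-- ===== PORT B =====
-- the layer's perimeter positions in clockwise order (the four comprehensions of Source B)
def layerPos (top bottom left right : Int) : List (Int × Int) :=
  (PySem.List.pyRange left (right + 1) 1).map (fun i => (top, i)) ++
  (PySem.List.pyRange (top + 1) (bottom + 1) 1).map (fun i => (i, right)) ++
  (PySem.List.pyRange (right - 1) (left - 1) (-1)).map (fun i => (bottom, i)) ++
  (PySem.List.pyRange (bottom - 1) top (-1)).map (fun i => (i, left))

-- fuel is a totality device only, as in rMatLoop
def rMatAltLoop (fuel : Nat) (m : List (List Int)) (top bottom left right : Int) : List (List Int) :=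
  match fuel with
  | 0 => m
  | fuel + 1 =>
  if left < right ∧ top < bottom then
    let pos := layerPos top bottom left right
    let vals := pos.map (fun p => pvGet m p.1 p.2)
    let rot := PySem.List.pyGetD vals (-1) 0 :: PySem.List.slice vals none (some (-1))
    let m' := (pos.zip rot).foldl (fun mm (pv : (Int × Int) × Int) => pvSet mm pv.1.1 pv.1.2 pv.2) m
    rMatAltLoop fuel m' (top + 1) (bottom - 1) (left + 1) (right - 1)
  else m

def rMat_alt (mat : List (List Int)) : Option (List (List Int)) :=
  if PySem.List.len mat = 0 then none
  else some (rMatAltLoop (PySem.List.len (PySem.List.pyGetD mat 0 []) - 1).toNat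
    mat 0 (PySem.List.len mat - 1) 0
    (PySem.List.len (PySem.List.pyGetD mat 0 []) - 1))

-- ===== PRECONDITION & SPEC =====
-- Pre_ excludes exactly the inputs on which A raises IndexError: matrices whose layer loop runs
-- (at least 2 rows and first row of length ≥ 2) while some row is shorter than the first row.
def Pre_rMat (mat : List (List Int)) : Prop :=
  mat.length ≤ 1 ∨ (mat.headD []).length ≤ 1 ∨ ∀ row ∈ mat, (mat.headD []).length ≤ row.length
instance (mat : List (List Int)) : Decidable (Pre_rMat mat) := by unfold Pre_rMat; infer_instance

def pvWitness_rMat : List (List Int) := [[1, 2, 3], [4, 5, 6], [7, 8, 9]]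

def Spec_rMat (mat : List (List Int)) (out : Option (List (List Int))) : Prop := out = rMat_alt mat
instance (mat : List (List Int)) (out : Option (List (List Int))) : Decidable (Spec_rMat mat out) := by unfold Spec_rMat; infer_instance

-- ===== CLAIM (what is proved, stated in full; the proofs are below) =====
def Claim_equal_rMat : Prop := ∀ (mat : List (List Int)), Dom_rMat mat → Pre_rMat mat → Spec_rMat mat (rMat mat)

-- ===== LEMMAS AND PROOFS =====

-- the row-length profile of a matrix; all in-range reasoning happens against it
def RL (m : List (List Int)) : List Nat := m.map List.length

def Valid (L : List Nat) (q : Int × Int) : Prop :=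
  0 ≤ q.1 ∧ q.1 < (L.length : Int) ∧ 0 ≤ q.2 ∧ q.2 < (L.getD q.1.toNat 0 : Int)

theorem RL_getD (m : List (List Int)) (n : Nat) :
    ((m.getD n []).length : Int) = ((RL m).getD n 0 : Int) := by
  unfold RL
  rcases Nat.lt_or_ge n m.length with h | h
  · rw [List.getD_eq_getElem _ _ h, List.getD_eq_getElem _ _ (by simpa using h)]
    simp
  · rw [List.getD_eq_default _ _ h, List.getD_eq_default _ _ (by simpa using h)]
    simp

theorem RL_pvSet (m : List (List Int)) (r c v : Int) (hr : 0 ≤ r) :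
    RL (pvSet m r c v) = RL m := by
  unfold RL pvSet
  rw [PySem.List.pySetD_of_nonneg _ _ hr]
  rcases Nat.lt_or_ge r.toNat m.length with h | h
  · apply List.ext_getElem (by simp)
    intro i hi1 hi2
    simp only [List.getElem_map, List.getElem_set]
    split
    · next heq =>
        subst heq
        rw [PySem.List.pyGetD_of_nonneg _ _ hr, List.getD_eq_getElem _ _ h]
        exact PySem.List.length_pySetD _ _ _
    · rfl
  · rw [List.set_eq_of_length_le h]

theorem pvGet_pvSet_ne (m : List (List Int)) (r c v r' c' : Int)
    (hq : Valid (RL m) (r, c)) (hp : Valid (RL m) (r', c'))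
    (hne : (r', c') ≠ (r, c)) :
    pvGet (pvSet m r c v) r' c' = pvGet m r' c' := by
  obtain ⟨hr0, hrlen, hc0, hclen⟩ := hq
  obtain ⟨hr'0, hr'len, hc'0, hc'len⟩ := hp
  simp only [RL, List.length_map] at hrlen hr'len
  have hrN : r.toNat < m.length := by omega
  have hr'N : r'.toNat < m.length := by omega
  unfold pvGet pvSet
  rw [PySem.List.pySetD_of_nonneg _ _ hr0,
      PySem.List.pyGetD_of_nonneg _ _ hr'0,
      PySem.List.pyGetD_of_nonneg m _ hr'0]
  by_cases hrr : r.toNat = r'.toNat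
  · have hreq : r = r' := by omega
    subst hreq
    have hcne : c.toNat ≠ c'.toNat := by
      have : c ≠ c' := fun hcc => hne (by rw [hcc])
      omega
    have hset : (m.set r.toNat (PySem.List.pySetD (PySem.List.pyGetD m r []) c v)).getD r.toNat []
        = PySem.List.pySetD (PySem.List.pyGetD m r []) c v := by
      rw [List.getD_eq_getElem?_getD]
      simp [hrN]
    rw [hset, PySem.List.pyGetD_of_nonneg _ _ hr0,
        PySem.List.pySetD_of_nonneg _ _ hc0,
        PySem.List.pyGetD_of_nonneg _ _ hc'0,
        PySem.List.pyGetD_of_nonneg _ _ hc'0,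
        List.getD_eq_getElem?_getD, List.getD_eq_getElem?_getD,
        List.getElem?_set_ne hcne]
    rw [List.getD_eq_getElem?_getD]
  · rw [List.getD_eq_getElem?_getD, List.getD_eq_getElem?_getD,
        List.getElem?_set_ne hrr]

theorem RL_scat (l : List ((Int × Int) × Int)) (m : List (List Int))
    (h : ∀ pv ∈ l, 0 ≤ pv.1.1) :
    RL (l.foldl (fun mm (pv : (Int × Int) × Int) => pvSet mm pv.1.1 pv.1.2 pv.2) m) = RL m := by
  induction l generalizing m with
  | nil => rfl
  | cons pv l ih =>
      rw [List.foldl_cons, ih _ (fun x hx => h x (by simp [hx])),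
          RL_pvSet _ _ _ _ (h pv (by simp))]

theorem zip_trunc {A B : Type} (ps : List A) (vs : List B) (x : B)
    (h : vs.length = ps.length) :
    ps.zip (x :: vs.dropLast) = ps.zip (x :: vs) := by
  induction ps generalizing vs x with
  | nil => rfl
  | cons p ps ih =>
      cases vs with
      | nil => simp at h
      | cons v vs' =>
          cases vs' with
          | nil =>
              cases ps with
              | nil => rfl
              | cons q qs => simp at h
          | cons w ws =>
              have hd : (v :: w :: ws).dropLast = v :: (w :: ws).dropLast := rfl
              rw [hd]
              simp only [List.zip_cons_cons]
              rw [ih (w :: ws) v (by simpa using h)]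

theorem cycle_scatter (ps : List (Int × Int)) (m : List (List Int)) (prev : Int)
    (hv : ∀ q ∈ ps, Valid (RL m) q) (hnd : ps.Nodup) :
    (ps.foldl (fun (s : List (List Int) × Int) q => (pvSet s.1 q.1 q.2 s.2, pvGet s.1 q.1 q.2)) (m, prev)).1 =
      (ps.zip (prev :: ps.map (fun q => pvGet m q.1 q.2))).foldl
        (fun mm (pv : (Int × Int) × Int) => pvSet mm pv.1.1 pv.1.2 pv.2) m := by
  induction ps generalizing m prev with
  | nil => rfl
  | cons q ps ih =>
      have hq := hv q (by simp)
      have hRL : RL (pvSet m q.1 q.2 prev) = RL m := RL_pvSet _ _ _ _ hq.1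
      have hmap : ps.map (fun p => pvGet (pvSet m q.1 q.2 prev) p.1 p.2)
          = ps.map (fun p => pvGet m p.1 p.2) := by
        apply List.map_congr_left
        intro p hp
        have hpq : p ≠ q := fun e => (List.nodup_cons.mp hnd).1 (e ▸ hp)
        exact pvGet_pvSet_ne m q.1 q.2 prev p.1 p.2 hq (hv p (by simp [hp]))
          (by simpa using hpq)
      rw [List.foldl_cons,
          ih (pvSet m q.1 q.2 prev) (pvGet m q.1 q.2)
            (fun p hp => hRL ▸ hv p (by simp [hp])) (List.nodup_cons.mp hnd).2]
      rw [hmap]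
      rfl

theorem layerPos_valid (m : List (List Int)) (t b l r : Int)
    (ht : 0 ≤ t) (hl : 0 ≤ l) (htb : t < b) (hlr : l < r)
    (hb : b < (m.length : Int)) (hrow : ∀ row ∈ m, r + 1 ≤ (row.length : Int)) :
    ∀ q ∈ layerPos t b l r, Valid (RL m) q := by
  have key : ∀ i j : Int, t ≤ i → i ≤ b → l ≤ j → j ≤ r → Valid (RL m) (i, j) := by
    intro i j h1 h2 h3 h4
    have hiN : i.toNat < m.length := by omega
    have hmem : m.getD i.toNat [] ∈ m := by
      rw [List.getD_eq_getElem _ _ hiN]; exact List.getElem_mem _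
    have hlen := hrow _ hmem
    have hRL := RL_getD m i.toNat
    refine ⟨by omega, ?_, by omega, ?_⟩
    · dsimp only
      simp only [RL, List.length_map]
      omega
    · dsimp only
      omega
  intro q hq
  simp only [layerPos, List.mem_append, List.mem_map,
    PySem.List.mem_pyRange_one, PySem.List.mem_pyRange_neg_one] at hq
  rcases hq with ((⟨i, hi, rfl⟩ | ⟨i, hi, rfl⟩) | ⟨i, hi, rfl⟩) | ⟨i, hi, rfl⟩
  · exact key _ _ (by omega) (by omega) (by omega) (by omega)
  · exact key _ _ (by omega) (by omega) (by omega) (by omega)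
  · exact key _ _ (by omega) (by omega) (by omega) (by omega)
  · exact key _ _ (by omega) (by omega) (by omega) (by omega)

theorem layerPos_nodup (t b l r : Int) (htb : t < b) (hlr : l < r) :
    (layerPos t b l r).Nodup := by
  have inj1 : Function.Injective (fun i : Int => ((t, i) : Int × Int)) :=
    fun a b hab => by simpa using hab
  have inj2 : Function.Injective (fun i : Int => ((i, r) : Int × Int)) :=
    fun a b hab => by simpa using hab
  have inj3 : Function.Injective (fun i : Int => ((b, i) : Int × Int)) :=
    fun a b hab => by simpa using hab
  have inj4 : Function.Injective (fun i : Int => ((i, l) : Int × Int)) :=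
    fun a b hab => by simpa using hab
  have nd3 : (PySem.List.pyRange (r - 1) (l - 1) (-1)).Nodup := by
    rw [PySem.List.pyRange_neg_one_eq_reverse]
    exact (List.nodup_reverse).mpr (PySem.List.nodup_pyRange_one _ _)
  have nd4 : (PySem.List.pyRange (b - 1) t (-1)).Nodup := by
    rw [PySem.List.pyRange_neg_one_eq_reverse]
    exact (List.nodup_reverse).mpr (PySem.List.nodup_pyRange_one _ _)
  unfold layerPos
  simp only [List.nodup_append, List.mem_append, List.mem_map,
    PySem.List.mem_pyRange_one, PySem.List.mem_pyRange_neg_one]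
  refine ⟨⟨⟨(PySem.List.nodup_pyRange_one _ _).map inj1,
      (PySem.List.nodup_pyRange_one _ _).map inj2, ?_⟩,
      nd3.map inj3, ?_⟩, nd4.map inj4, ?_⟩
  · rintro a ⟨i, hi, rfl⟩ x ⟨j, hj, rfl⟩
    intro heq
    injection heq with h1 h2
    omega
  · rintro a (⟨i, hi, rfl⟩ | ⟨i, hi, rfl⟩) x ⟨j, hj, rfl⟩ <;>
      · intro heq
        injection heq with h1 h2
        omega
  · rintro a ((⟨i, hi, rfl⟩ | ⟨i, hi, rfl⟩) | ⟨i, hi, rfl⟩) x ⟨j, hj, rfl⟩ <;>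
      · intro heq
        injection heq with h1 h2
        omega

theorem layerPos_last (t b l r : Int) (htb : t < b) (hlr : l < r) :
    ∃ front, layerPos t b l r = front ++ [((t + 1 : Int), l)] := by
  rcases eq_or_lt_of_le (by omega : t + 1 ≤ b) with hb | hb
  · -- two rows: the fourth range is empty, the third ends at (b, l) = (t+1, l)
    subst hb
    refine ⟨(PySem.List.pyRange l (r + 1) 1).map (fun i => (t, i)) ++
      (PySem.List.pyRange (t + 1) (t + 1 + 1) 1).map (fun i => (i, r)) ++
      ((PySem.List.pyRange (l + 1) r 1).reverse.map (fun i => (t + 1, i))), ?_⟩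
    unfold layerPos
    rw [PySem.List.pyRange_neg_one_eq_nil (show (t : Int) + 1 - 1 ≤ t by omega),
        PySem.List.pyRange_neg_one_eq_reverse (r - 1) (l - 1)]
    have e1 : (l : Int) - 1 + 1 = l := by omega
    have e2 : (r : Int) - 1 + 1 = r := by omega
    rw [e1, e2, PySem.List.pyRange_one_cons (show l < r from hlr), List.reverse_cons,
        List.map_append]
    simp [List.append_assoc]
  · -- the fourth range ends at (t+1, l)
    refine ⟨(PySem.List.pyRange l (r + 1) 1).map (fun i => (t, i)) ++
      (PySem.List.pyRange (t + 1) (b + 1) 1).map (fun i => (i, r)) ++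
      (PySem.List.pyRange (r - 1) (l - 1) (-1)).map (fun i => (b, i)) ++
      ((PySem.List.pyRange (t + 1 + 1) b 1).reverse.map (fun i => (i, l))), ?_⟩
    unfold layerPos
    rw [PySem.List.pyRange_neg_one_eq_reverse (b - 1) t]
    have e1 : (b : Int) - 1 + 1 = b := by omega
    rw [e1, PySem.List.pyRange_one_cons (show t + 1 < b from hb), List.reverse_cons,
        List.map_append]
    simp [List.append_assoc]

theorem layer_eq (m : List (List Int)) (t b l r : Int)
    (hval : ∀ q ∈ layerPos t b l r, Valid (RL m) q)
    (htb : t < b) (hlr : l < r) :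
    ((PySem.List.pyRange (b - 1) (t + 1 - 1) (-1)).foldl
      (fun (s : List (List Int) × Int) i => (pvSet s.1 i l s.2, pvGet s.1 i l))
      ((PySem.List.pyRange (r - 1) (l - 1) (-1)).foldl
        (fun (s : List (List Int) × Int) i => (pvSet s.1 b i s.2, pvGet s.1 b i))
        ((PySem.List.pyRange (t + 1) (b + 1) 1).foldl
          (fun (s : List (List Int) × Int) i => (pvSet s.1 i r s.2, pvGet s.1 i r))
          ((PySem.List.pyRange l (r + 1) 1).foldl
            (fun (s : List (List Int) × Int) i => (pvSet s.1 t i s.2, pvGet s.1 t i))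
            (m, pvGet m (t + 1) l))))).1
    = ((layerPos t b l r).zip
        (PySem.List.pyGetD ((layerPos t b l r).map (fun p => pvGet m p.1 p.2)) (-1) 0 ::
          PySem.List.slice ((layerPos t b l r).map (fun p => pvGet m p.1 p.2)) none (some (-1)))).foldl
        (fun mm (pv : (Int × Int) × Int) => pvSet mm pv.1.1 pv.1.2 pv.2) m := by
  obtain ⟨front, hfront⟩ := layerPos_last t b l r htb hlr
  have hlast : PySem.List.pyGetD ((layerPos t b l r).map (fun p => pvGet m p.1 p.2)) (-1) 0
      = pvGet m (t + 1) l := by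
    rw [hfront, List.map_append]
    exact PySem.List.pyGetD_neg_one_append_singleton _ _ _
  have e : (t : Int) + 1 - 1 = t := by omega
  rw [e, PySem.List.slice_to_neg_one, hlast,
      zip_trunc _ _ _ (by simp),
      ← cycle_scatter (layerPos t b l r) m (pvGet m (t + 1) l) hval (layerPos_nodup t b l r htb hlr)]
  simp only [layerPos, List.foldl_append, List.foldl_map]

theorem loop_eq (fuel : Nat) (m : List (List Int)) (t b l r : Int)
    (ht : 0 ≤ t) (hl : 0 ≤ l)
    (hb : t < b → l < r → b < (m.length : Int))
    (hrow : t < b → l < r → ∀ row ∈ m, r + 1 ≤ (row.length : Int)) :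
    rMatLoop fuel m t b l r = rMatAltLoop fuel m t b l r := by
  induction fuel generalizing m t b l r with
  | zero => rfl
  | succ fuel ih => ?_
  unfold rMatLoop rMatAltLoop
  by_cases hc : l < r ∧ t < b
  · simp only [if_pos hc]
    have hval := layerPos_valid m t b l r ht hl hc.2 hc.1 (hb hc.2 hc.1) (hrow hc.2 hc.1)
    rw [layer_eq m t b l r hval hc.2 hc.1]
    have hRL := RL_scat ((layerPos t b l r).zip
        (PySem.List.pyGetD ((layerPos t b l r).map (fun p => pvGet m p.1 p.2)) (-1) 0 ::
          PySem.List.slice ((layerPos t b l r).map (fun p => pvGet m p.1 p.2)) none (some (-1)))) m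
        (fun pv hpv => (hval pv.1 (List.of_mem_zip hpv).1).1)
    apply ih _ _ _ _ _ (by omega) (by omega)
    · intro h1 _
      have hlen := congrArg List.length hRL
      simp only [RL, List.length_map] at hlen
      have := hb hc.2 hc.1
      omega
    · intro h1 h2 row hrowm
      have hmem : row.length ∈ RL m := by
        rw [← hRL]
        exact List.mem_map_of_mem hrowm
      obtain ⟨row0, hrow0, hlen0⟩ := List.mem_map.mp hmem
      have := hrow hc.2 hc.1 row0 hrow0
      omega
  · simp only [if_neg hc]

theorem headD_eq_getD (mat : List (List Int)) : mat.headD [] = mat.getD 0 [] := by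
  cases mat <;> rfl

-- ===== VERDICT (by name: the statement is the Claim_ definition above) =====
theorem rMat_spec : Claim_equal_rMat := by
  intro mat _hd hpre
  unfold Spec_rMat rMat rMat_alt
  by_cases h0 : PySem.List.len mat = 0
  · simp only [if_pos h0]
  · simp only [if_neg h0]
    congr 1
    have hlen0 : PySem.List.pyGetD mat 0 [] = mat.getD 0 [] := by
      rw [PySem.List.pyGetD_of_nonneg _ _ (by omega)]; rfl
    apply loop_eq _ _ _ _ _ _ le_rfl le_rfl
    · intro _ _
      simp only [PySem.List.len_eq] at h0 ⊢
      omega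
    · intro hA hB row hrow
      rw [hlen0] at hB ⊢
      simp only [PySem.List.len_eq] at hA hB h0 ⊢
      rcases hpre with hp | hp | hp
      · omega
      · rw [headD_eq_getD] at hp
        omega
      · have := hp row hrow
        rw [headD_eq_getD] at this
        omega
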